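-- pv_equiv track=rewrite | github.com/lothar243/adventOfCode2022 | day09/part1.py | visualize_visited
-- ===== SOURCE A (Python) =====
-- def visualize_visited(visited: dict):
--     visitedXs = [location[0] for location in visited.keys()]
--     minX = min(visitedXs)
--     maxX = max(visitedXs)
--
--     visitedYs = [location[1] for location in visited.keys()]
--     minY = min(visitedYs)
--     maxY = max(visitedYs)
--     charMap = [ (['.'] * (maxX - minX + 1)) for _ in range(maxY - minY + 1)]
--     for location in visited.keys():
--         charMap[location[1] - minY][location[0] - minX] = '#'
--     charMap[-minY][-minX] = 's'
--     return charMap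
-- ===== SOURCE B (Python) =====
-- def visualize_visited(visited: dict):
--     xs = [k[0] for k in visited.keys()]
--     ys = [k[1] for k in visited.keys()]
--     minX, maxX = min(xs), max(xs)
--     minY, maxY = min(ys), max(ys)
--     pts = {(k[0], k[1]) for k in visited.keys()}
--     charMap = [['#' if (x, y) in pts else '.' for x in range(minX, maxX + 1)]
--                for y in range(minY, maxY + 1)]
--     charMap[-minY][-minX] = 's'
--     return charMap
-- ===== Notes on version B (the rewrite author's own statement) =====
-- stated objective: alternative
-- what changed: A allocates an all-dots grid and mutates cells to '#' by indexing with each visited key; B builds a set of (x,y) points once and constructs the grid in one nested comprehension over every cell, placing '#' by membership test, with the same final 's' assignment.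
-- outside the precondition, e.g. on visualize_visited({}): A raises ValueError, B raises ValueError; on visualize_visited({(2, 3): 0}): A raises IndexError, B raises IndexError
import Mathlib
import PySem

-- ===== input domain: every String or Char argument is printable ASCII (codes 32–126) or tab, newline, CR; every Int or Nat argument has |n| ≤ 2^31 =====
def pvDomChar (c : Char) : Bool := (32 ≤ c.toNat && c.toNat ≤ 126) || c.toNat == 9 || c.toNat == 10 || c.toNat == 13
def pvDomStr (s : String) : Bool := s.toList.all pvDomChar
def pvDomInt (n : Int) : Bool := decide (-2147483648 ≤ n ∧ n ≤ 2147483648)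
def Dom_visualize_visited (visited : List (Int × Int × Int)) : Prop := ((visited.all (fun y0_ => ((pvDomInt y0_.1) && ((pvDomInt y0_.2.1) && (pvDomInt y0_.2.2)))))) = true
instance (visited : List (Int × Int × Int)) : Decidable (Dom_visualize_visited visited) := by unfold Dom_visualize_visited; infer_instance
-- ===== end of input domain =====

-- B replaces A's allocate-dots-then-mutate grid construction by a visited-set membership
-- comprehension over every grid cell (different decomposition, similar cost).
-- The input list models the Python dict's key triples (x, y, extra) in insertion order.

-- ===== PORT A =====
def visualize_visited (visited : List (Int × Int × Int)) : List (List String) :=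
  let visitedXs := visited.map (fun location => location.1)
  let visitedYs := visited.map (fun location => location.2.1)
  match PySem.List.min? visitedXs (fun x => x), PySem.List.max? visitedXs (fun x => x),
        PySem.List.min? visitedYs (fun x => x), PySem.List.max? visitedYs (fun x => x) with
  | some minX, some maxX, some minY, some maxY =>
      -- charMap = [['.'] * (maxX - minX + 1) for _ in range(maxY - minY + 1)]
      let charMap0 := (PySem.List.pyRange 0 (maxY - minY + 1)).map
        (fun _ => PySem.List.pyRepeat ["."] (maxX - minX + 1))
      -- for location in visited.keys(): charMap[location[1]-minY][location[0]-minX] = '#'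
      -- (these indices are provably in range, so the total pyGetD/pySetD are exact here)
      let charMap := visited.foldl
        (fun cm location =>
          PySem.List.pySetD cm (location.2.1 - minY)
            (PySem.List.pySetD (PySem.List.pyGetD cm (location.2.1 - minY) [])
              (location.1 - minX) "#"))
        charMap0
      -- charMap[-minY][-minX] = 's'  (Python index, may wrap; none = IndexError, excluded by Pre_)
      match PySem.List.pyGet? charMap (-minY) with
      | some row =>
          match PySem.List.pySet? row (-minX) "s" with
          | some row' => PySem.List.pySetD charMap (-minY) row'
          | none => []
      | none => []
  | _, _, _, _ => []   -- min()/max() of an empty sequence: ValueError, excluded by Pre_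

-- ===== PORT B =====
def visualize_visited_alt (visited : List (Int × Int × Int)) : List (List String) :=
  let xs := visited.map (fun k => k.1)
  let ys := visited.map (fun k => k.2.1)
  match PySem.List.min? xs (fun x => x), PySem.List.max? xs (fun x => x) with
  | none, _ => []     -- min() of an empty sequence: ValueError, excluded by Pre_
  | some _, none => []
  | some minX, some maxX =>
    match PySem.List.min? ys (fun x => x), PySem.List.max? ys (fun x => x) with
    | none, _ => []
    | some _, none => []
    | some minY, some maxY =>
      -- pts = {(k[0], k[1]) for k in visited.keys()}
      let pts : PySem.Set (Int × Int) := PySem.Set.ofList (visited.map (fun k => (k.1, k.2.1)))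
      -- charMap = [['#' if (x, y) in pts else '.' for x in range(minX, maxX+1)] for y in range(minY, maxY+1)]
      let charMap := (PySem.List.pyRange minY (maxY + 1)).map (fun y =>
        (PySem.List.pyRange minX (maxX + 1)).map (fun x =>
          if PySem.Set.contains pts (x, y) then "#" else "."))
      -- charMap[-minY][-minX] = 's'  (Python index, may wrap; none = IndexError, excluded by Pre_)
      (PySem.List.pyGet? charMap (-minY)).elim []
        (fun row =>
          (PySem.List.pySet? row (-minX) "s").elim []
            (fun row' => PySem.List.pySetD charMap (-minY) row'))


-- ===== PRECONDITION & SPEC =====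
-- extrema of the visited coordinates (input-shape data, used only by Pre_)
def pvMinX_vv (v : List (Int × Int × Int)) : Int := (PySem.List.min? (v.map (fun k => k.1)) (fun x => x)).getD 0
def pvMaxX_vv (v : List (Int × Int × Int)) : Int := (PySem.List.max? (v.map (fun k => k.1)) (fun x => x)).getD 0
def pvMinY_vv (v : List (Int × Int × Int)) : Int := (PySem.List.min? (v.map (fun k => k.2.1)) (fun x => x)).getD 0
def pvMaxY_vv (v : List (Int × Int × Int)) : Int := (PySem.List.max? (v.map (fun k => k.2.1)) (fun x => x)).getD 0

-- Pre_ excludes exactly the inputs on which the Python A raises: the empty dict (ValueError from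
-- min()) and inputs where the final "charMap[-minY][-minX] = 's'" assignment is an IndexError
-- because the (possibly wrapped) index falls outside the grid.
def Pre_visualize_visited (visited : List (Int × Int × Int)) : Prop :=
  visited ≠ [] ∧
  PySem.Raise.InRange (pvMaxY_vv visited - pvMinY_vv visited + 1).toNat (-(pvMinY_vv visited)) ∧
  PySem.Raise.InRange (pvMaxX_vv visited - pvMinX_vv visited + 1).toNat (-(pvMinX_vv visited))
instance (visited : List (Int × Int × Int)) : Decidable (Pre_visualize_visited visited) := by
  unfold Pre_visualize_visited PySem.Raise.InRange; infer_instance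

def pvWitness_visualize_visited : (List (Int × Int × Int)) := [(0, 0, 0), (1, 1, 0)]

def Spec_visualize_visited (visited : List (Int × Int × Int)) (out : List (List String)) : Prop := out = visualize_visited_alt visited
instance (visited : List (Int × Int × Int)) (out : List (List String)) : Decidable (Spec_visualize_visited visited out) := by unfold Spec_visualize_visited; infer_instance

-- ===== CLAIM (what is proved, stated in full; the proofs are below) =====
def Claim_equal_visualize_visited : Prop := ∀ (visited : List (Int × Int × Int)), Dom_visualize_visited visited → Pre_visualize_visited visited → Spec_visualize_visited visited (visualize_visited visited)

-- ===== LEMMAS AND PROOFS =====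

lemma pvRange_one_eq (a b : Int) :
    PySem.List.pyRange a b = List.map (fun k : Nat => a + (k : Int)) (List.range (b - a).toNat) := by
  unfold PySem.List.pyRange
  rw [if_neg (by norm_num : ¬ (1:Int) = 0)]
  rw [if_pos (by norm_num : (0:Int) < 1)]
  by_cases h : a < b
  · rw [if_pos h]
    have h1 : (b - a + 1 - 1) / 1 = b - a := by omega
    simp only [one_mul, h1]
  · rw [if_neg h]
    have h0 : (b - a).toNat = 0 := by omega
    simp [h0]

-- canonical grid: entry (i, j) is f (minX + j) (minY + i)
def pvGrid (minX maxX minY maxY : Int) (f : Int → Int → String) : List (List String) :=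
  (List.range (maxY + 1 - minY).toNat).map (fun i : Nat =>
    (List.range (maxX + 1 - minX).toNat).map (fun j : Nat => f (minX + (j : Int)) (minY + (i : Int))))

lemma pvGrid_B (minX maxX minY maxY : Int) (f : Int → Int → String) :
    (PySem.List.pyRange minY (maxY + 1)).map (fun y =>
      (PySem.List.pyRange minX (maxX + 1)).map (fun x => f x y))
    = pvGrid minX maxX minY maxY f := by
  simp [pvRange_one_eq, pvGrid, List.map_map, Function.comp_def]

lemma pvGrid_dots (minX maxX minY maxY : Int) :
    (PySem.List.pyRange 0 (maxY - minY + 1)).map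
      (fun _ => PySem.List.pyRepeat ["."] (maxX - minX + 1))
    = pvGrid minX maxX minY maxY (fun _ _ => ".") := by
  rw [pvRange_one_eq, pvGrid]
  simp only [List.map_map, Function.comp_def, PySem.List.pyRepeat_singleton, List.map_const']
  have h1 : (maxY - minY + 1 - 0).toNat = (maxY + 1 - minY).toNat := by omega
  rw [h1]
  have h2 : (maxX - minX + 1).toNat = (maxX + 1 - minX).toNat := by omega
  simp [h2]

lemma pvMark_step (minX maxX minY maxY x0 y0 : Int) (f : Int → Int → String)
    (hx1 : minX ≤ x0) (_hx2 : x0 ≤ maxX) (hy1 : minY ≤ y0) (hy2 : y0 ≤ maxY) :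
    PySem.List.pySetD (pvGrid minX maxX minY maxY f) (y0 - minY)
      (PySem.List.pySetD (PySem.List.pyGetD (pvGrid minX maxX minY maxY f) (y0 - minY) [])
        (x0 - minX) "#")
    = pvGrid minX maxX minY maxY (fun x y => if x == x0 && y == y0 then "#" else f x y) := by
  have hH : ((pvGrid minX maxX minY maxY f).length : Int) = maxY + 1 - minY := by
    simp [pvGrid]; omega
  have hylen : y0 - minY < ((pvGrid minX maxX minY maxY f).length : Int) := by omega
  rw [PySem.List.pyGetD_eq_getElem _ _ (by omega) hylen]
  rw [PySem.List.pySetD_of_nonneg _ _ (by omega : (0:Int) ≤ y0 - minY)]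
  rw [PySem.List.pySetD_of_nonneg _ _ (by omega : (0:Int) ≤ x0 - minX)]
  apply List.ext_getElem
  · simp [pvGrid]
  · intro i hi hi'
    simp only [pvGrid, List.getElem_set, List.getElem_map, List.getElem_range] at *
    by_cases hiy : (y0 - minY).toNat = i
    · rw [if_pos hiy]
      subst hiy
      apply List.ext_getElem
      · simp
      · intro j hj hj'
        simp only [List.getElem_set, List.getElem_map, List.getElem_range] at *
        by_cases hjx : (x0 - minX).toNat = j
        · rw [if_pos hjx]
          have : (minX + (j:Int) == x0 && minY + ((y0 - minY).toNat : Int) == y0) = true := by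
            simp only [Bool.and_eq_true, beq_iff_eq]
            omega
          rw [this]
          simp
        · have : (minX + (j:Int) == x0 && minY + ((y0 - minY).toNat : Int) == y0) = false := by
            simp only [Bool.and_eq_false_iff, beq_eq_false_iff_ne, ne_eq]
            left
            omega
          rw [if_neg hjx, this]
          simp
    · rw [if_neg hiy]
      apply List.map_congr_left
      intro j hj
      have : (minX + (j:Int) == x0 && minY + (i:Int) == y0) = false := by
        simp only [Bool.and_eq_false_iff, beq_eq_false_iff_ne, ne_eq]
        right
        simp only [pvGrid] at hi
        omega
      rw [this]
      simp

lemma pvGrid_congr (minX maxX minY maxY : Int) (f g : Int → Int → String)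
    (h : ∀ x y, f x y = g x y) :
    pvGrid minX maxX minY maxY f = pvGrid minX maxX minY maxY g := by
  unfold pvGrid
  apply List.map_congr_left
  intro i _
  apply List.map_congr_left
  intro j _
  exact h _ _

lemma pvFold_mark (minX maxX minY maxY : Int) (l : List (Int × Int × Int))
    (f : Int → Int → String)
    (hb : ∀ k ∈ l, minX ≤ k.1 ∧ k.1 ≤ maxX ∧ minY ≤ k.2.1 ∧ k.2.1 ≤ maxY) :
    l.foldl
      (fun cm location =>
        PySem.List.pySetD cm (location.2.1 - minY)
          (PySem.List.pySetD (PySem.List.pyGetD cm (location.2.1 - minY) [])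
            (location.1 - minX) "#"))
      (pvGrid minX maxX minY maxY f)
    = pvGrid minX maxX minY maxY
        (fun x y => if l.any (fun k => x == k.1 && y == k.2.1) then "#" else f x y) := by
  induction l generalizing f with
  | nil =>
      simp only [List.foldl_nil, List.any_nil]
      exact pvGrid_congr _ _ _ _ _ _ (fun x y => by simp)
  | cons k t ih =>
      obtain ⟨h1, h2, h3, h4⟩ := hb k (List.mem_cons_self)
      rw [List.foldl_cons,
          pvMark_step minX maxX minY maxY k.1 k.2.1 f h1 h2 h3 h4,
          ih _ (fun q hq => hb q (List.mem_cons_of_mem _ hq))]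
      apply pvGrid_congr
      intro x y
      cases h5 : (x == k.1 && y == k.2.1)
      · cases h6 : t.any (fun q => x == q.1 && y == q.2.1) <;> simp [List.any_cons, h5, h6]
      · simp [List.any_cons, h5]

lemma pvContains_eq (v : List (Int × Int × Int)) (x y : Int) :
    PySem.Set.contains (PySem.Set.ofList (v.map (fun k => (k.1, k.2.1)))) (x, y)
    = v.any (fun k => x == k.1 && y == k.2.1) := by
  rw [Bool.eq_iff_iff]
  simp only [PySem.Set.contains, List.contains_eq_mem, decide_eq_true_eq]
  rw [PySem.Set.mem_ofList]
  simp only [List.any_eq_true, Bool.and_eq_true, beq_iff_eq, List.mem_map]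
  constructor
  · rintro ⟨k, hk, hkeq⟩
    exact ⟨k, hk, by simpa [Prod.ext_iff, eq_comm] using hkeq⟩
  · rintro ⟨k, hk, h1, h2⟩
    exact ⟨k, hk, by simp [h1, h2]⟩

lemma pvTail_eq (C : List (List String)) (mX mY : Int) :
    (match PySem.List.pyGet? C (-mY) with
     | some row =>
         match PySem.List.pySet? row (-mX) "s" with
         | some row' => PySem.List.pySetD C (-mY) row'
         | none => []
     | none => []) =
    (PySem.List.pyGet? C (-mY)).elim []
      (fun row =>
        (PySem.List.pySet? row (-mX) "s").elim []
          (fun row' => PySem.List.pySetD C (-mY) row')) := by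
  rcases PySem.List.pyGet? C (-mY) with _ | row
  · rfl
  · show (match PySem.List.pySet? row (-mX) "s" with
          | some row' => PySem.List.pySetD C (-mY) row'
          | none => []) =
         (PySem.List.pySet? row (-mX) "s").elim []
           (fun row' => PySem.List.pySetD C (-mY) row')
    rcases PySem.List.pySet? row (-mX) "s" with _ | row' <;> rfl

lemma pvMain_eq (v : List (Int × Int × Int)) (hne : v ≠ []) :
    visualize_visited v = visualize_visited_alt v := by
  obtain ⟨mX, hmX⟩ : ∃ m, PySem.List.min? (v.map (fun k => k.1)) (fun x => x) = some m := by
    cases h : PySem.List.min? (v.map (fun k => k.1)) (fun x => x) with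
    | none => exact absurd (by simpa using (PySem.List.min?_eq_none_iff _ _).mp h) hne
    | some m => exact ⟨m, rfl⟩
  obtain ⟨MX, hMX⟩ : ∃ m, PySem.List.max? (v.map (fun k => k.1)) (fun x => x) = some m := by
    cases h : PySem.List.max? (v.map (fun k => k.1)) (fun x => x) with
    | none => exact absurd (by simpa using (PySem.List.max?_eq_none_iff _ _).mp h) hne
    | some m => exact ⟨m, rfl⟩
  obtain ⟨mY, hmY⟩ : ∃ m, PySem.List.min? (v.map (fun k => k.2.1)) (fun x => x) = some m := by
    cases h : PySem.List.min? (v.map (fun k => k.2.1)) (fun x => x) with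
    | none => exact absurd (by simpa using (PySem.List.min?_eq_none_iff _ _).mp h) hne
    | some m => exact ⟨m, rfl⟩
  obtain ⟨MY, hMY⟩ : ∃ m, PySem.List.max? (v.map (fun k => k.2.1)) (fun x => x) = some m := by
    cases h : PySem.List.max? (v.map (fun k => k.2.1)) (fun x => x) with
    | none => exact absurd (by simpa using (PySem.List.max?_eq_none_iff _ _).mp h) hne
    | some m => exact ⟨m, rfl⟩
  have hb : ∀ k ∈ v, mX ≤ k.1 ∧ k.1 ≤ MX ∧ mY ≤ k.2.1 ∧ k.2.1 ≤ MY := by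
    intro k hk
    exact ⟨PySem.List.min?_isMin hmX _ (List.mem_map_of_mem hk),
           PySem.List.max?_isMax hMX _ (List.mem_map_of_mem hk),
           PySem.List.min?_isMin hmY _ (List.mem_map_of_mem hk),
           PySem.List.max?_isMax hMY _ (List.mem_map_of_mem hk)⟩
  have hgrid :
      v.foldl
        (fun cm location =>
          PySem.List.pySetD cm (location.2.1 - mY)
            (PySem.List.pySetD (PySem.List.pyGetD cm (location.2.1 - mY) [])
              (location.1 - mX) "#"))
        ((PySem.List.pyRange 0 (MY - mY + 1)).map
          (fun _ => PySem.List.pyRepeat ["."] (MX - mX + 1)))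
      = (PySem.List.pyRange mY (MY + 1)).map (fun y =>
          (PySem.List.pyRange mX (MX + 1)).map (fun x =>
            if PySem.Set.contains (PySem.Set.ofList (v.map (fun k => (k.1, k.2.1)))) (x, y)
            then "#" else ".")) := by
    rw [pvGrid_dots, pvFold_mark mX MX mY MY v _ hb, pvGrid_B]
    apply pvGrid_congr
    intro x y
    rw [pvContains_eq]
  simp only [visualize_visited, visualize_visited_alt]
  rw [hmX, hMX, hmY, hMY]
  simp only []
  rw [hgrid]
  exact pvTail_eq _ _ _

-- ===== VERDICT (by name: the statement is the Claim_ definition above) =====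
theorem visualize_visited_spec : Claim_equal_visualize_visited := by
  intro v _ hpre
  exact pvMain_eq v hpre.1
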